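-- pv_equiv track=rewrite | github.com/queelius/computational-explorations | src/lower_bound_techniques.py | coprime_adj
-- ===== SOURCE A (Python) =====
-- import math
-- from typing import Dict, List, Optional, Set, Tuple
--
-- def coprime_adj(n: int) -> Dict[int, Set[int]]:
--     """Adjacency dict for the coprime graph on [n]."""
--     adj: Dict[int, Set[int]] = {v: set() for v in range(1, n + 1)}
--     for i in range(1, n + 1):
--         for j in range(i + 1, n + 1):
--             if math.gcd(i, j) == 1:
--                 adj[i].add(j)
--                 adj[j].add(i)
--     return adj
-- ===== SOURCE B (Python) =====
-- from math import isqrt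
--
-- def coprime_adj(n):
--     """Adjacency dict for the coprime graph on [n].
--
--     Sieve formulation: for each vertex v, enumerate the divisors of v in divisor
--     pairs (a, v // a) with a up to isqrt(v), mark the multiples of every divisor
--     greater than one with a C-speed slice assignment, and keep the unmarked
--     vertices other than v itself: exactly the ones coprime to v.  No per-pair
--     gcd computation at all.
--     """
--     adj = {}
--     for v in range(1, n + 1):
--         marked = [False] * (n + 1)
--         for a in range(1, isqrt(v) + 1):
--             if v % a == 0:
--                 if a > 1:
--                     marked[a::a] = [True] * (n // a)
--                 b = v // a
--                 if b > 1:
--                     marked[b::b] = [True] * (n // b)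
--         adj[v] = {u for u in range(1, n + 1) if u != v and not marked[u]}
--     return adj
-- ===== Notes on version B (the rewrite author's own statement) =====
-- stated objective: faster
-- what changed: Instead of testing every pair with a gcd call, B builds each vertex's neighbourhood by a sieve: it enumerates the divisors of v in complementary pairs up to the integer square root of v, marks the multiples of each nontrivial divisor with a slice assignment, and keeps the unmarked vertices, removing the per-pair gcd computation entirely.
import Mathlib
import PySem

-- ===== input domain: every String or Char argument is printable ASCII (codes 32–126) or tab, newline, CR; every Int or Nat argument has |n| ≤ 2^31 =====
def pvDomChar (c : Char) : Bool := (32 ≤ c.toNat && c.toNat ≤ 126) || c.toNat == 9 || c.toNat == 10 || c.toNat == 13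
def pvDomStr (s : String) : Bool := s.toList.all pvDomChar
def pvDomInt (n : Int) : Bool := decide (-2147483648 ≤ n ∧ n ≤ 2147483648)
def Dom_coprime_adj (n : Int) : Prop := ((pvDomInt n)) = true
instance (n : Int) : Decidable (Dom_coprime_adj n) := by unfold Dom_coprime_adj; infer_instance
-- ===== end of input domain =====

-- B replaces A's per-pair gcd test by a per-vertex divisor sieve: enumerate the divisors of v
-- in complementary pairs up to the integer square root of v, mark the multiples of each
-- nontrivial divisor, keep the unmarked vertices.

-- ===== PORT A =====
-- adj = {v: set() for v in range(1, n + 1)}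
def coprime_adjInit (n : Int) : PySem.Dict Int (PySem.Set Int) :=
  (PySem.List.pyRange 1 (n + 1)).foldl (fun d v => d.insert v PySem.Set.empty) PySem.Dict.empty

-- the inner 'for j in range(i + 1, n + 1)' loop; adj[i].add(j) / adj[j].add(i) is
-- Dict.modify at a key that is always present, so the default Set.empty is never used
def coprime_adjInner (n i : Int) (d : PySem.Dict Int (PySem.Set Int)) :
    PySem.Dict Int (PySem.Set Int) :=
  (PySem.List.pyRange (i + 1) (n + 1)).foldl (fun d j =>
    if Int.gcd i j = 1 then
      (d.modify i PySem.Set.empty (fun s => PySem.Set.add s j)).modify j PySem.Set.empty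
        (fun s => PySem.Set.add s i)
    else d) d

def coprime_adj (n : Int) : List (Int × List Int) :=
  ((PySem.List.pyRange 1 (n + 1)).foldl (fun d i => coprime_adjInner n i d)
    (coprime_adjInit n)).items

-- ===== PORT B =====
-- one row: marked = [False]*(n+1); for a in range(1, isqrt(v)+1): if v % a == 0:
-- mark multiples of a (if a > 1) and of b = v // a (if b > 1); then
-- {u for u in range(1, n+1) if u != v and not marked[u]}  (set in iteration order).
-- math.isqrt(v) is Nat.sqrt v.toNat (exact, v ≥ 0 here); the slice assignment
-- marked[d::d] = [True]*(n//d) writes True to exactly the indices d, 2d, ... ≤ n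
-- (RHS length equals the slice length), ported as a fold of List.set over those
-- indices; 'marked[u]' is pyGetD, exact since 0 ≤ index ≤ n < len.
def coprime_adjRow (n v : Int) : List Int :=
  let marked : List Bool := List.replicate (n + 1).toNat false
  let marked := (PySem.List.pyRange 1 ((Nat.sqrt v.toNat : Int) + 1)).foldl (fun mk a =>
      if PySem.Int.mod v a = 0 then
        let mk := if 1 < a then
            (PySem.List.pyRange a (n + 1) a).foldl (fun mk m => mk.set m.toNat true) mk
          else mk
        let b := PySem.Int.floordiv v a
        if 1 < b then
          (PySem.List.pyRange b (n + 1) b).foldl (fun mk m => mk.set m.toNat true) mk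
        else mk
      else mk) marked
  PySem.Set.ofList ((PySem.List.pyRange 1 (n + 1)).filter
      (fun u => decide (u ≠ v) && !(PySem.List.pyGetD marked u false)))

def coprime_adj_alt (n : Int) : List (Int × List Int) :=
  ((PySem.List.pyRange 1 (n + 1)).foldl (fun d v => d.insert v (coprime_adjRow n v))
    (PySem.Dict.empty : PySem.Dict Int (List Int))).items

-- ===== PRECONDITION & SPEC =====
def Spec_coprime_adj (n : Int) (out : List (Int × List Int)) : Prop := out = coprime_adj_alt n
instance (n : Int) (out : List (Int × List Int)) : Decidable (Spec_coprime_adj n out) := by unfold Spec_coprime_adj; infer_instance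

-- ===== CLAIM (what is proved, stated in full; the proofs are below) =====
def Claim_equal_coprime_adj : Prop := ∀ (n : Int), Dom_coprime_adj n → Spec_coprime_adj n (coprime_adj n)

-- ===== LEMMAS AND PROOFS =====

-- the canonical value both ports compute: for each v in 1..n, the ascending list of
-- u in 1..n with u ≠ v and gcd(u,v) = 1
def pvCanon (n : Int) : List (Int × List Int) :=
  (PySem.List.pyRange 1 (n + 1)).map (fun v =>
    (v, (PySem.List.pyRange 1 (n + 1)).filter
      (fun u => decide (u ≠ v) && decide (Int.gcd u v = 1))))

----------------------------------------------------------------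
-- A side
----------------------------------------------------------------

-- membership of u in v's set after A has processed all outer rounds i < K and,
-- in outer round K, the inner indices j < J
def pvIn (v u K J : Int) : Bool :=
  decide (u ≠ v) && decide (Int.gcd u v = 1) &&
    (decide (min u v < K) || (decide (min u v = K) && decide (max u v < J)))

lemma pvIn_iff (v u K J : Int) : pvIn v u K J = true ↔
    (u ≠ v ∧ Int.gcd u v = 1 ∧ (min u v < K ∨ (min u v = K ∧ max u v < J))) := by
  simp [pvIn, and_assoc]

lemma pvIn_eq_false (v u K J : Int)
    (h : ¬(u ≠ v ∧ Int.gcd u v = 1 ∧ (min u v < K ∨ (min u v = K ∧ max u v < J)))) :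
    pvIn v u K J = false := by
  rw [Bool.eq_false_iff]
  intro hc
  exact h ((pvIn_iff _ _ _ _).mp hc)

lemma pvIn_succ (v u K J : Int)
    (h : Int.gcd u v ≠ 1 ∨ ¬(min u v = K ∧ max u v = J)) :
    pvIn v u K (J + 1) = pvIn v u K J := by
  rw [Bool.eq_iff_iff, pvIn_iff, pvIn_iff]
  rcases h with h | h
  · constructor <;> rintro ⟨a, b, _⟩ <;> exact absurd b h
  · constructor <;> rintro ⟨a, b, c | ⟨c, e⟩⟩ <;> exact ⟨a, b, by omega⟩

def pvInv (n K J : Int) (d : PySem.Dict Int (PySem.Set Int)) : Prop :=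
  d.keys = PySem.List.pyRange 1 (n + 1) ∧
  ∀ v ∈ PySem.List.pyRange 1 (n + 1),
    d.getD v PySem.Set.empty =
      (PySem.List.pyRange 1 (n + 1)).filter (fun u => pvIn v u K J)

lemma pvInitAux (l : List Int) (v : Int) (d : PySem.Dict Int (PySem.Set Int))
    (h : d.getD v PySem.Set.empty = PySem.Set.empty) :
    (l.foldl (fun d k => d.insert k PySem.Set.empty) d).getD v PySem.Set.empty =
      PySem.Set.empty := by
  induction l generalizing d with
  | nil => exact h
  | cons k l ih =>
    rw [List.foldl_cons]
    apply ih
    rw [PySem.Dict.getD_insert]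
    split
    · rfl
    · exact h

lemma pvInit_inv (n : Int) : pvInv n 1 2 (coprime_adjInit n) := by
  constructor
  · rw [coprime_adjInit, PySem.Dict.keys_foldl_insert]
    show PySem.Set.update PySem.Dict.empty.keys _ = _
    rw [PySem.Dict.keys_empty]
    exact PySem.Set.ofList_eq_self_of_nodup _ (PySem.List.nodup_pyRange_one _ _)
  · intro v hv
    rw [PySem.List.mem_pyRange_one] at hv
    rw [coprime_adjInit, pvInitAux _ _ _ (PySem.Dict.getD_empty _ _)]
    symm
    show List.filter _ _ = ([] : List Int)
    rw [List.filter_eq_nil_iff]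
    intro u hu
    rw [PySem.List.mem_pyRange_one] at hu
    rw [Bool.not_eq_true]
    apply pvIn_eq_false
    rintro ⟨h1, _, h3 | ⟨h3, h4⟩⟩ <;> omega

lemma pvStep_inv (n K J : Int) (d : PySem.Dict Int (PySem.Set Int))
    (h1 : 1 ≤ K) (hKJ : K < J) (hJn : J ≤ n) (hinv : pvInv n K J d) :
    pvInv n K (J + 1)
      (if Int.gcd K J = 1 then
        (d.modify K PySem.Set.empty (fun s => PySem.Set.add s J)).modify J PySem.Set.empty
          (fun s => PySem.Set.add s K)
      else d) := by
  obtain ⟨hkeys, hget⟩ := hinv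
  have hKmem : K ∈ PySem.List.pyRange 1 (n + 1) := by rw [PySem.List.mem_pyRange_one]; omega
  have hJmem : J ∈ PySem.List.pyRange 1 (n + 1) := by rw [PySem.List.mem_pyRange_one]; omega
  by_cases hg : Int.gcd K J = 1
  · rw [if_pos hg]
    constructor
    · have hcK : d.contains K = true := by
        rw [PySem.Dict.contains_iff_mem_keys, hkeys]; exact hKmem
      have hk1 : (d.modify K PySem.Set.empty (fun s => PySem.Set.add s J)).keys = d.keys := by
        rw [PySem.Dict.keys_modify, PySem.Dict.keys_insert_of_contains _ _ hcK]
      have hcJ : (d.modify K PySem.Set.empty (fun s => PySem.Set.add s J)).contains J = true := by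
        rw [PySem.Dict.contains_iff_mem_keys, hk1, hkeys]; exact hJmem
      rw [PySem.Dict.keys_modify, PySem.Dict.keys_insert_of_contains _ _ hcJ, hk1, hkeys]
    · intro v hv
      have hvb : 1 ≤ v ∧ v < n + 1 := by rwa [PySem.List.mem_pyRange_one] at hv
      rcases eq_or_ne v J with hvJ | hvJ
      · -- entry J gains K at the end
        rw [hvJ]
        rw [PySem.Dict.getD_modify_self, PySem.Dict.getD_modify_of_ne _ _ _ (by omega),
          hget _ hJmem]
        have hKnot : pvIn J K K J = false := by
          apply pvIn_eq_false
          rintro ⟨_, _, h3 | ⟨h3, h4⟩⟩ <;> omega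
        have hKnotmem : K ∉ (PySem.List.pyRange 1 (n + 1)).filter (fun u => pvIn J u K J) := by
          intro hmem
          rw [List.mem_filter, hKnot] at hmem
          exact absurd hmem.2 (by simp)
        have hadd : PySem.Set.add
            ((PySem.List.pyRange 1 (n + 1)).filter (fun u => pvIn J u K J)) K =
            ((PySem.List.pyRange 1 (n + 1)).filter (fun u => pvIn J u K J)) ++ [K] := by
          rw [PySem.Set.add]
          split
          · next hc => exact absurd (by simpa using hc) hKnotmem
          · rfl
        rw [hadd]
        have hsplit : PySem.List.pyRange 1 (n + 1) =
            PySem.List.pyRange 1 K ++ K :: PySem.List.pyRange (K + 1) (n + 1) := by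
          rw [PySem.List.pyRange_one_append 1 K (n + 1) (by omega) (by omega)]
          congr 1
          exact PySem.List.pyRange_one_cons (by omega)
        rw [hsplit, List.filter_append, List.filter_append, List.filter_cons, List.filter_cons]
        have hKnew : pvIn J K K (J + 1) = true := by
          rw [pvIn_iff]
          exact ⟨by omega, hg, Or.inr ⟨by omega, by omega⟩⟩
        have hlow : (PySem.List.pyRange 1 K).filter (fun u => pvIn J u K (J + 1)) =
            (PySem.List.pyRange 1 K).filter (fun u => pvIn J u K J) := by
          apply List.filter_congr
          intro u hu
          rw [PySem.List.mem_pyRange_one] at hu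
          rw [Bool.eq_iff_iff, pvIn_iff, pvIn_iff]
          constructor <;> rintro ⟨a, b, c | ⟨c, e⟩⟩ <;> exact ⟨a, b, by omega⟩
        have hhi : ∀ u ∈ PySem.List.pyRange (K + 1) (n + 1), u ≠ K →
            (pvIn J u K (J + 1) = false ∧ pvIn J u K J = false) := by
          intro u hu _
          rw [PySem.List.mem_pyRange_one] at hu
          constructor <;> (apply pvIn_eq_false; rintro ⟨a, _, c | ⟨c, e⟩⟩) <;> omega
        have hhi1 : (PySem.List.pyRange (K + 1) (n + 1)).filter
            (fun u => pvIn J u K (J + 1)) = [] := by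
          rw [List.filter_eq_nil_iff]
          intro u hu
          simp [(hhi u hu (by rw [PySem.List.mem_pyRange_one] at hu; omega)).1]
        have hhi2 : (PySem.List.pyRange (K + 1) (n + 1)).filter
            (fun u => pvIn J u K J) = [] := by
          rw [List.filter_eq_nil_iff]
          intro u hu
          simp [(hhi u hu (by rw [PySem.List.mem_pyRange_one] at hu; omega)).2]
        rw [hKnew, hKnot, hlow, hhi1, hhi2]
        simp
      rcases eq_or_ne v K with hvK | hvK
      · -- entry K gains J at the end
        rw [hvK]
        rw [PySem.Dict.getD_modify_of_ne _ _ _ (by omega), PySem.Dict.getD_modify_self,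
          hget _ hKmem]
        have hJnot : pvIn K J K J = false := by
          apply pvIn_eq_false
          rintro ⟨_, _, h3 | ⟨h3, h4⟩⟩ <;> omega
        have hJnotmem : J ∉ (PySem.List.pyRange 1 (n + 1)).filter (fun u => pvIn K u K J) := by
          intro hmem
          rw [List.mem_filter, hJnot] at hmem
          exact absurd hmem.2 (by simp)
        have hadd : PySem.Set.add
            ((PySem.List.pyRange 1 (n + 1)).filter (fun u => pvIn K u K J)) J =
            ((PySem.List.pyRange 1 (n + 1)).filter (fun u => pvIn K u K J)) ++ [J] := by
          rw [PySem.Set.add]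
          split
          · next hc => exact absurd (by simpa using hc) hJnotmem
          · rfl
        rw [hadd]
        have hsplit : PySem.List.pyRange 1 (n + 1) =
            PySem.List.pyRange 1 J ++ J :: PySem.List.pyRange (J + 1) (n + 1) := by
          rw [PySem.List.pyRange_one_append 1 J (n + 1) (by omega) (by omega)]
          congr 1
          exact PySem.List.pyRange_one_cons (by omega)
        rw [hsplit, List.filter_append, List.filter_append, List.filter_cons, List.filter_cons]
        have hJnew : pvIn K J K (J + 1) = true := by
          rw [pvIn_iff]
          exact ⟨by omega, by rw [Int.gcd_comm]; exact hg, Or.inr ⟨by omega, by omega⟩⟩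
        have hlow : (PySem.List.pyRange 1 J).filter (fun u => pvIn K u K (J + 1)) =
            (PySem.List.pyRange 1 J).filter (fun u => pvIn K u K J) := by
          apply List.filter_congr
          intro u hu
          rw [PySem.List.mem_pyRange_one] at hu
          rw [Bool.eq_iff_iff, pvIn_iff, pvIn_iff]
          constructor <;> rintro ⟨a, b, c | ⟨c, e⟩⟩ <;> exact ⟨a, b, by omega⟩
        have hhi : ∀ u ∈ PySem.List.pyRange (J + 1) (n + 1),
            (pvIn K u K (J + 1) = false ∧ pvIn K u K J = false) := by
          intro u hu
          rw [PySem.List.mem_pyRange_one] at hu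
          constructor <;> (apply pvIn_eq_false; rintro ⟨a, _, c | ⟨c, e⟩⟩) <;> omega
        have hhi1 : (PySem.List.pyRange (J + 1) (n + 1)).filter
            (fun u => pvIn K u K (J + 1)) = [] := by
          rw [List.filter_eq_nil_iff]; intro u hu; simp [(hhi u hu).1]
        have hhi2 : (PySem.List.pyRange (J + 1) (n + 1)).filter
            (fun u => pvIn K u K J) = [] := by
          rw [List.filter_eq_nil_iff]; intro u hu; simp [(hhi u hu).2]
        rw [hJnew, hJnot, hlow, hhi1, hhi2]
        simp
      · -- other entries are untouched
        rw [PySem.Dict.getD_modify_of_ne _ _ _ hvJ, PySem.Dict.getD_modify_of_ne _ _ _ hvK,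
          hget _ hv]
        apply List.filter_congr
        intro u hu
        refine (pvIn_succ v u K J ?_).symm
        right
        rintro ⟨hmin, hmax⟩
        have hp : (u = K ∧ v = J) ∨ (u = J ∧ v = K) := by omega
        rcases hp with ⟨_, hv'⟩ | ⟨_, hv'⟩
        · exact hvJ hv'
        · exact hvK hv'
  · rw [if_neg hg]
    refine ⟨hkeys, fun v hv => ?_⟩
    rw [hget _ hv]
    apply List.filter_congr
    intro u hu
    refine (pvIn_succ v u K J ?_).symm
    by_cases hp : min u v = K ∧ max u v = J
    · left
      have hpair : (u = K ∧ v = J) ∨ (u = J ∧ v = K) := by omega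
      rcases hpair with ⟨hu', hv'⟩ | ⟨hu', hv'⟩
      · subst hu'; subst hv'; exact hg
      · subst hu'; subst hv'; rw [Int.gcd_comm]; exact hg
    · right
      exact hp

lemma pvInnerAux (n K : Int) (h1 : 1 ≤ K) :
    ∀ (m : Nat) (d : PySem.Dict Int (PySem.Set Int)), K + 1 + (m : Int) ≤ n + 1 →
      pvInv n K (K + 1) d →
      pvInv n K (K + 1 + (m : Int))
        ((PySem.List.pyRange (K + 1) (K + 1 + (m : Int))).foldl (fun d j =>
          if Int.gcd K j = 1 then
            (d.modify K PySem.Set.empty (fun s => PySem.Set.add s j)).modify j PySem.Set.empty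
              (fun s => PySem.Set.add s K)
          else d) d) := by
  intro m
  induction m with
  | zero =>
    intro d _ hinv
    simpa [PySem.List.pyRange_one_eq_nil (by omega : K + 1 + (0:Int) ≤ K + 1)] using hinv
  | succ m ih =>
    intro d hle hinv
    have hcast : K + 1 + ((m + 1 : Nat) : Int) = (K + 1 + (m : Int)) + 1 := by push_cast; ring
    rw [hcast, PySem.List.pyRange_one_succ_right (by omega), List.foldl_append,
      List.foldl_cons, List.foldl_nil]
    exact pvStep_inv n K (K + 1 + (m : Int)) _ h1 (by omega) (by push_cast at hle; omega)
      (ih d (by push_cast at hle ⊢; omega) hinv)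

lemma pvInner_inv (n K : Int) (h1 : 1 ≤ K) (hK : K ≤ n)
    (d : PySem.Dict Int (PySem.Set Int)) (hinv : pvInv n K (K + 1) d) :
    pvInv n K (n + 1) (coprime_adjInner n K d) := by
  have hm : K + 1 + ((n - K).toNat : Int) = n + 1 := by omega
  have := pvInnerAux n K h1 (n - K).toNat d (by omega) hinv
  rw [hm] at this
  exact this

lemma pvShift_inv (n K : Int) (_h1 : 1 ≤ K) (d : PySem.Dict Int (PySem.Set Int))
    (hinv : pvInv n K (n + 1) d) : pvInv n (K + 1) (K + 2) d := by
  obtain ⟨hkeys, hget⟩ := hinv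
  refine ⟨hkeys, fun v hv => ?_⟩
  have hvb : 1 ≤ v ∧ v < n + 1 := by rwa [PySem.List.mem_pyRange_one] at hv
  rw [hget _ hv]
  apply List.filter_congr
  intro u hu
  rw [PySem.List.mem_pyRange_one] at hu
  rw [Bool.eq_iff_iff, pvIn_iff, pvIn_iff]
  constructor <;> rintro ⟨a, b, c | ⟨c, e⟩⟩ <;> exact ⟨a, b, by omega⟩

lemma pvOuter_inv (n : Int) (m : Nat) (hm : (m : Int) ≤ n) :
    pvInv n (1 + (m : Int)) (1 + (m : Int) + 1)
      ((PySem.List.pyRange 1 (1 + (m : Int))).foldl (fun d i => coprime_adjInner n i d)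
        (coprime_adjInit n)) := by
  induction m with
  | zero =>
    simpa [PySem.List.pyRange_one_eq_nil (by omega : (1:Int) + 0 ≤ 1)] using pvInit_inv n
  | succ m ih =>
    have hcast : 1 + ((m + 1 : Nat) : Int) = (1 + (m : Int)) + 1 := by push_cast; ring
    rw [hcast, PySem.List.pyRange_one_succ_right (by omega), List.foldl_append,
      List.foldl_cons, List.foldl_nil]
    have hmn : (m : Int) ≤ n := by push_cast at hm; omega
    have h2 := pvInner_inv n (1 + (m : Int)) (by omega) (by push_cast at hm; omega) _
      (by
        have := ih hmn
        exact this)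
    have h3 := pvShift_inv n (1 + (m : Int)) (by omega) _ h2
    have h4 : (1 : Int) + (m : Int) + 1 + 1 = 1 + (m : Int) + 2 := by ring
    rw [h4]
    exact h3

lemma pvA_eq_canon (n : Int) : coprime_adj n = pvCanon n := by
  by_cases hn : 1 ≤ n
  · have hm : (1 : Int) + (n.toNat : Int) = n + 1 := by omega
    have hinv := pvOuter_inv n n.toNat (by omega)
    rw [hm] at hinv
    obtain ⟨hkeys, hget⟩ := hinv
    rw [coprime_adj, PySem.Dict.items_eq_map_keys _
      (by rw [hkeys]; exact PySem.List.nodup_pyRange_one _ _) PySem.Set.empty, hkeys, pvCanon]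
    apply List.map_congr_left
    intro v hv
    have hvb : 1 ≤ v ∧ v < n + 1 := by rwa [PySem.List.mem_pyRange_one] at hv
    rw [hget _ hv]
    refine congrArg _ ?_
    apply List.filter_congr
    intro u hu
    rw [PySem.List.mem_pyRange_one] at hu
    rw [Bool.eq_iff_iff, pvIn_iff]
    constructor
    · rintro ⟨a, b, _⟩; simp [a, b]
    · intro h
      simp only [Bool.and_eq_true, decide_eq_true_eq] at h
      exact ⟨h.1, h.2, Or.inl (by omega)⟩
  · have hnil : PySem.List.pyRange 1 (n + 1) = [] :=
      PySem.List.pyRange_one_eq_nil (by omega)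
    rw [coprime_adj, coprime_adjInit, pvCanon, hnil]
    simp only [List.foldl_nil, List.map_nil]
    rfl

----------------------------------------------------------------
-- B side
----------------------------------------------------------------

lemma pvSetFold_length (ms : List Int) (mk : List Bool) :
    (ms.foldl (fun mk m => mk.set m.toNat true) mk).length = mk.length := by
  induction ms generalizing mk with
  | nil => rfl
  | cons m ms ih => simp [List.foldl_cons, ih, List.length_set]

lemma pvSetFold_getD (ms : List Int) (mk : List Bool) (u : Int) (hu : 0 ≤ u)
    (hms : ∀ m ∈ ms, 0 ≤ m ∧ m.toNat < mk.length) :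
    (ms.foldl (fun mk m => mk.set m.toNat true) mk).getD u.toNat false =
      (decide (u ∈ ms) || mk.getD u.toNat false) := by
  induction ms generalizing mk with
  | nil => simp
  | cons m ms ih =>
    obtain ⟨hm0, hmlen⟩ := hms m (by simp)
    rw [List.foldl_cons, ih (mk.set m.toNat true)
      (fun x hx => by simpa [List.length_set] using hms x (by simp [hx]))]
    by_cases h : u = m
    · subst h
      simp [List.getD_eq_getElem?_getD, List.getElem?_set_self hmlen]
    · have : u.toNat ≠ m.toNat := by omega
      simp [List.getD_eq_getElem?_getD, List.getElem?_set_ne (Ne.symm this), h]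

lemma pvSlice_getD (n dd : Int) (mk : List Bool) (hlen : mk.length = (n + 1).toNat)
    (u : Int) (hu : 1 ≤ u) (hun : u ≤ n) (hd : 2 ≤ dd) :
    ((PySem.List.pyRange dd (n + 1) dd).foldl (fun mk m => mk.set m.toNat true) mk).getD
        u.toNat false = (decide (dd ∣ u) || mk.getD u.toNat false) := by
  rw [pvSetFold_getD _ _ _ (by omega)]
  · have hmem : decide (u ∈ PySem.List.pyRange dd (n + 1) dd) = decide (dd ∣ u) := by
      simp only [decide_eq_decide, PySem.List.mem_pyRange_iff_of_pos (by omega : (0:Int) < dd)]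
      constructor
      · rintro ⟨h1, h2, h3⟩
        simpa using (dvd_sub_comm.mp h3)
      · intro h
        exact ⟨Int.le_of_dvd (by omega) h, by omega, (Int.dvd_sub h (dvd_refl dd))⟩
    rw [hmem]
  · intro m hm
    rw [PySem.List.mem_pyRange_iff_of_pos (by omega : (0:Int) < dd)] at hm
    exact ⟨by omega, by rw [hlen]; omega⟩

lemma pvMark2_getD (n v : Int) (as : List Int) (mk : List Bool)
    (hlen : mk.length = (n + 1).toNat) (u : Int) (hu : 1 ≤ u) (hun : u ≤ n)
    (has : ∀ a ∈ as, 1 ≤ a) :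
    (as.foldl (fun mk a =>
        if PySem.Int.mod v a = 0 then
          let mk := if 1 < a then
              (PySem.List.pyRange a (n + 1) a).foldl (fun mk m => mk.set m.toNat true) mk
            else mk
          let b := PySem.Int.floordiv v a
          if 1 < b then
            (PySem.List.pyRange b (n + 1) b).foldl (fun mk m => mk.set m.toNat true) mk
          else mk
        else mk) mk).getD u.toNat false =
      (as.any (fun a => decide (PySem.Int.mod v a = 0) &&
        ((decide (1 < a) && decide (a ∣ u)) ||
         (decide (1 < PySem.Int.floordiv v a) && decide (PySem.Int.floordiv v a ∣ u)))) ||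
        mk.getD u.toNat false) := by
  induction as generalizing mk with
  | nil => simp
  | cons a as ih =>
    have ha1 : 1 ≤ a := has a (by simp)
    -- length of the body result
    have hblen : ∀ mk' : List Bool, mk'.length = (n + 1).toNat →
        ((if PySem.Int.mod v a = 0 then
          let mk := if 1 < a then
              (PySem.List.pyRange a (n + 1) a).foldl (fun mk m => mk.set m.toNat true) mk'
            else mk'
          let b := PySem.Int.floordiv v a
          if 1 < b then
            (PySem.List.pyRange b (n + 1) b).foldl (fun mk m => mk.set m.toNat true) mk
          else mk
        else mk') : List Bool).length = (n + 1).toNat := by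
      intro mk' h
      dsimp only
      split
      · split
        · rw [pvSetFold_length]
          split
          · rw [pvSetFold_length, h]
          · exact h
        · split
          · rw [pvSetFold_length, h]
          · exact h
      · exact h
    rw [List.foldl_cons, ih _ (hblen mk hlen) (fun x hx => has x (by simp [hx]))]
    have hbody : ((if PySem.Int.mod v a = 0 then
          let mk2 := if 1 < a then
              (PySem.List.pyRange a (n + 1) a).foldl (fun mk m => mk.set m.toNat true) mk
            else mk
          let b := PySem.Int.floordiv v a
          if 1 < b then
            (PySem.List.pyRange b (n + 1) b).foldl (fun mk m => mk.set m.toNat true) mk2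
          else mk2
        else mk) : List Bool).getD u.toNat false =
        ((decide (PySem.Int.mod v a = 0) &&
          ((decide (1 < a) && decide (a ∣ u)) ||
           (decide (1 < PySem.Int.floordiv v a) && decide (PySem.Int.floordiv v a ∣ u)))) ||
          mk.getD u.toNat false) := by
      dsimp only
      by_cases hmod : PySem.Int.mod v a = 0
      · rw [if_pos hmod]
        by_cases hA : 1 < a
        · rw [if_pos hA]
          by_cases hb : 1 < PySem.Int.floordiv v a
          · rw [if_pos hb, pvSlice_getD n _ _ (by rw [pvSetFold_length, hlen]) u hu hun (by omega),
              pvSlice_getD n a mk hlen u hu hun (by omega)]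
            simp [hmod, hA, hb, Bool.or_assoc, Bool.or_left_comm]
          · rw [if_neg hb, pvSlice_getD n a mk hlen u hu hun (by omega)]
            simp [hmod, hA, hb]
        · rw [if_neg hA]
          by_cases hb : 1 < PySem.Int.floordiv v a
          · rw [if_pos hb, pvSlice_getD n _ mk hlen u hu hun (by omega)]
            simp [hmod, hA, hb]
          · rw [if_neg hb]
            simp [hmod, hA, hb]
      · rw [if_neg hmod]
        simp [hmod]
    rw [hbody, List.any_cons]
    cases h1 : (decide (PySem.Int.mod v a = 0) &&
          ((decide (1 < a) && decide (a ∣ u)) ||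
           (decide (1 < PySem.Int.floordiv v a) && decide (PySem.Int.floordiv v a ∣ u)))) <;>
      simp [*]

lemma pvNT (u v : Int) (hu : 1 ≤ u) (hv : 1 ≤ v) :
    (∃ d, 2 ≤ d ∧ d ≤ v ∧ d ∣ v ∧ d ∣ u) ↔ Int.gcd u v ≠ 1 := by
  constructor
  · rintro ⟨d, hd2, hdv, hdvdv, hdvdu⟩ h1
    have hdn : (d.toNat : Int) = d := by omega
    have hdvd : d.toNat ∣ Int.gcd u v :=
      Int.dvd_gcd (by rw [hdn]; exact hdvdu) (by rw [hdn]; exact hdvdv)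
    have hpos : 0 < Int.gcd u v := Int.gcd_pos_of_ne_zero_left v (by omega)
    have := Nat.le_of_dvd hpos hdvd
    omega
  · intro h
    have hpos : 0 < Int.gcd u v := Int.gcd_pos_of_ne_zero_left v (by omega)
    exact ⟨(Int.gcd u v : Int), by omega, Int.le_of_dvd (by omega) (Int.gcd_dvd_right u v),
      Int.gcd_dvd_right u v, Int.gcd_dvd_left u v⟩

lemma pvAny_eq (v u : Int) (hv : 1 ≤ v) (hu : 1 ≤ u) :
    ((PySem.List.pyRange 1 ((Nat.sqrt v.toNat : Int) + 1)).any (fun a =>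
      decide (PySem.Int.mod v a = 0) &&
        ((decide (1 < a) && decide (a ∣ u)) ||
         (decide (1 < PySem.Int.floordiv v a) && decide (PySem.Int.floordiv v a ∣ u))))) =
      decide (Int.gcd u v ≠ 1) := by
  rw [Bool.eq_iff_iff]
  simp only [List.any_eq_true, PySem.List.mem_pyRange_one, Bool.and_eq_true, Bool.or_eq_true,
    decide_eq_true_eq, PySem.Int.mod_eq_zero_iff_dvd]
  rw [← pvNT u v hu hv]
  constructor
  · rintro ⟨a, ⟨ha1, _⟩, hav, hcase⟩
    have ha0 : (0:Int) < a := by omega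
    rcases hcase with ⟨ha2, hau⟩ | ⟨hb2, hbu⟩
    · exact ⟨a, by omega, Int.le_of_dvd (by omega) hav, hav, hau⟩
    · rw [PySem.Int.floordiv_eq_ediv_of_pos ha0] at hb2 hbu
      exact ⟨v / a, by omega, Int.le_of_dvd (by omega) (Int.ediv_dvd_of_dvd hav),
        Int.ediv_dvd_of_dvd hav, hbu⟩
  · rintro ⟨d, hd2, hdv, hdvdv, hdvdu⟩
    by_cases hds : d ≤ (Nat.sqrt v.toNat : Int)
    · exact ⟨d, ⟨by omega, by omega⟩, hdvdv, Or.inl ⟨by omega, hdvdu⟩⟩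
    · -- d is the large member of its divisor pair; use a = v / d
      have had : (v / d) * d = v := Int.ediv_mul_cancel hdvdv
      have h2 : (d.toNat : Int) = d := by omega
      have h1v : (v.toNat : Int) = v := by omega
      have ha1 : 1 ≤ v / d := by nlinarith [had]
      have hvd2 : v < d * d := by
        have hs := (Nat.sqrt_lt (m := v.toNat) (n := d.toNat)).mp (by omega)
        nlinarith [hs]
      have hda : v / d ≤ d := by nlinarith [had]
      have hasq : (v / d) * (v / d) ≤ v := by nlinarith [had]
      have hsle : v / d ≤ (Nat.sqrt v.toNat : Int) := by
        have h3 : ((v / d).toNat : Int) = v / d := by omega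
        have h4 : (v / d).toNat * (v / d).toNat ≤ v.toNat := by zify; rw [h3, h1v]; exact hasq
        have := Nat.le_sqrt.mpr h4
        omega
      refine ⟨v / d, ⟨by omega, by omega⟩, ⟨d, had.symm⟩, Or.inr ?_⟩
      rw [PySem.Int.floordiv_eq_ediv_of_pos (by omega : (0:Int) < v / d)]
      have heq : v / (v / d) = d := by
        have h5 := Int.mul_ediv_cancel_left (a := v / d) d (by omega : v / d ≠ 0)
        rw [had] at h5
        exact h5
      rw [heq]
      exact ⟨by omega, hdvdu⟩

lemma pvRow_eq (n v : Int) (hv : 1 ≤ v) (hvn : v ≤ n) :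
    coprime_adjRow n v =
      (PySem.List.pyRange 1 (n + 1)).filter
        (fun u => decide (u ≠ v) && decide (Int.gcd u v = 1)) := by
  unfold coprime_adjRow
  dsimp only
  have hfe : (PySem.List.pyRange 1 (n + 1)).filter
      (fun u => decide (u ≠ v) && !(PySem.List.pyGetD
        ((PySem.List.pyRange 1 ((Nat.sqrt v.toNat : Int) + 1)).foldl (fun mk a =>
          if PySem.Int.mod v a = 0 then
            let mk := if 1 < a then
                (PySem.List.pyRange a (n + 1) a).foldl (fun mk m => mk.set m.toNat true) mk
              else mk
            let b := PySem.Int.floordiv v a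
            if 1 < b then
              (PySem.List.pyRange b (n + 1) b).foldl (fun mk m => mk.set m.toNat true) mk
            else mk
          else mk) (List.replicate (n + 1).toNat false)) u false)) =
      (PySem.List.pyRange 1 (n + 1)).filter
        (fun u => decide (u ≠ v) && decide (Int.gcd u v = 1)) := by
    apply List.filter_congr
    intro u hu
    rw [PySem.List.mem_pyRange_one] at hu
    rw [PySem.List.pyGetD_of_nonneg _ _ (by omega)]
    rw [pvMark2_getD n v _ _ (by simp) u (by omega) (by omega)
      (by intro a ha; rw [PySem.List.mem_pyRange_one] at ha; omega)]
    rw [pvAny_eq v u hv (by omega)]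
    have hrep : (List.replicate (n + 1).toNat false).getD u.toNat false = false := by
      simp [List.getD_eq_getElem?_getD, show u.toNat < (n + 1).toNat by omega]
    rw [hrep]
    cases h : decide (Int.gcd u v = 1) <;> simp [h]
  rw [hfe]
  exact PySem.Set.ofList_eq_self_of_nodup _ ((PySem.List.nodup_pyRange_one _ _).filter _)

lemma pvB_eq_canon (n : Int) : coprime_adj_alt n = pvCanon n := by
  unfold coprime_adj_alt pvCanon
  rw [PySem.Dict.items_foldl_insert_fresh _ (fun v => v) (fun v => coprime_adjRow n v) _
    (by intro a _; exact PySem.Dict.contains_empty a)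
    (by simpa using PySem.List.nodup_pyRange_one 1 (n + 1))]
  simp only [PySem.Dict.empty, List.nil_append]
  apply List.map_congr_left
  intro v hv
  rw [PySem.List.mem_pyRange_one] at hv
  rw [pvRow_eq n v (by omega) (by omega)]

-- ===== VERDICT (by name: the statement is the Claim_ definition above) =====
theorem coprime_adj_spec : Claim_equal_coprime_adj := by
  intro n _
  unfold Spec_coprime_adj
  rw [pvA_eq_canon, pvB_eq_canon]
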